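-- pv_equiv track=rewrite | github.com/jamesfowkes/blast-search | sequences.py | split_into_sequences
-- ===== SOURCE A (Python) =====
-- def split_into_sequences(lines):
--
-- 	result = []
-- 	results = []
--
-- 	for line in lines:
-- 		if line.startswith(">Gene"):
-- 			results.append(result)
-- 			result = [line]
-- 		else:
-- 			result.append(line)
--
-- 	return results
-- ===== SOURCE B (Python) =====
-- def split_into_sequences(lines):
--     # Different decomposition: break the input at ">Gene" markers recursively
--     # (take the marker-free prefix, then start the next group at each marker);
--     # the tail after the last marker is dropped, as in the original.
--     def _break(xs):
--         pre = []
--         for i, x in enumerate(xs):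
--             if x.startswith(">Gene"):
--                 return pre, xs[i:]
--             pre.append(x)
--         return pre, []
--
--     pre, rest = _break(list(lines))
--     out = []
--     head = None
--     while rest:
--         out.append(pre if head is None else [head] + pre)
--         head = rest[0]
--         pre, rest = _break(rest[1:])
--     return out
-- ===== Notes on version B (the rewrite author's own statement) =====
-- stated objective: alternative
-- what changed: Replaces the single fold that rebuilds a running group line-by-line with a break-at-next-marker decomposition: a helper splits off the marker-free prefix and a loop emits one whole group per marker, dropping the tail after the last marker.
import Mathlib
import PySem

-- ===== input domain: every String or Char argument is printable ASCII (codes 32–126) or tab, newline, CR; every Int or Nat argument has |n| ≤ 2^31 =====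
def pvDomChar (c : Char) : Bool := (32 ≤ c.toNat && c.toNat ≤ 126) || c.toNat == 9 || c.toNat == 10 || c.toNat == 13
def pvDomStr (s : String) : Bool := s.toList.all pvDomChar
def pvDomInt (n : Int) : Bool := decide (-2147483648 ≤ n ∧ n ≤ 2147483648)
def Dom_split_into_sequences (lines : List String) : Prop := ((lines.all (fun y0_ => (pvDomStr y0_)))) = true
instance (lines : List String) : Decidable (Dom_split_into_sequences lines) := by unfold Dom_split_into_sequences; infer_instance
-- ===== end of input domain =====

-- B replaces A's single line-by-line fold with a break-at-next-marker decomposition (alternative structure, same cost).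

-- ===== PORT A =====
-- A: one fold carrying (result, results); at a marker, flush result and restart with [line].
def split_into_sequences (lines : List String) : List (List String) :=
  (lines.foldl
    (fun (st : List String × List (List String)) line =>
      if PySem.Str.startswith line ">Gene" then ([line], st.2 ++ [st.1])
      else (st.1 ++ [line], st.2))
    ([], [])).2

-- ===== PORT B =====
-- _break: split off the marker-free prefix (structural recursion over the same scan).
def pvBreak : List String → List String × List String
  | [] => ([], [])
  | x :: xs =>
    if PySem.Str.startswith x ">Gene" then ([], x :: xs)
    else
      let pr := pvBreak xs
      (x :: pr.1, pr.2)

theorem pvBreak_snd_len : ∀ xs : List String, (pvBreak xs).2.length ≤ xs.length := by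
  intro xs
  induction xs with
  | nil => simp [pvBreak]
  | cons x xs ih =>
    simp only [pvBreak]
    split
    · simp
    · simpa using Nat.le_succ_of_le ih

-- the while loop: emit one group per marker, head = the marker opening the current group.
def pvLoop (head : Option String) (pre : List String) (rest : List String) : List (List String) :=
  match rest with
  | [] => []
  | m :: tail =>
    let grp := match head with | none => pre | some h => h :: pre
    let pr := pvBreak tail
    grp :: pvLoop (some m) pr.1 pr.2
termination_by rest.length
decreasing_by
  simpa using Nat.lt_succ_of_le (pvBreak_snd_len tail)

def split_into_sequences_alt (lines : List String) : List (List String) :=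
  let pr := pvBreak lines
  pvLoop none pr.1 pr.2

-- ===== PRECONDITION & SPEC =====
def Spec_split_into_sequences (lines : List String) (out : List (List String)) : Prop := out = split_into_sequences_alt lines
instance (lines : List String) (out : List (List String)) : Decidable (Spec_split_into_sequences lines out) := by unfold Spec_split_into_sequences; infer_instance

-- ===== CLAIM (what is proved, stated in full; the proofs are below) =====
def Claim_equal_split_into_sequences : Prop := ∀ (lines : List String), Dom_split_into_sequences lines → Spec_split_into_sequences lines (split_into_sequences lines)

-- ===== LEMMAS AND PROOFS =====

-- A's fold step, named so the lemmas can speak about it.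
def pvStepA (st : List String × List (List String)) (line : String) : List String × List (List String) :=
  if PySem.Str.startswith line ">Gene" then ([line], st.2 ++ [st.1]) else (st.1 ++ [line], st.2)

-- gA: A's fold with the accumulator made explicit (the groups produced from here on,
-- given the currently open group r).
def pvGA : List String → List String → List (List String)
  | [], _ => []
  | l :: ls, r =>
    if PySem.Str.startswith l ">Gene" then r :: pvGA ls [l] else pvGA ls (r ++ [l])

theorem pvFoldA_eq (xs : List String) : ∀ (r : List String) (rs : List (List String)),
    (xs.foldl pvStepA (r, rs)).2 = rs ++ pvGA xs r := by
  induction xs with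
  | nil => intro r rs; simp [pvGA]
  | cons l ls ih =>
    intro r rs
    simp only [List.foldl_cons, pvGA, pvStepA]
    by_cases h : PySem.Str.startswith l ">Gene"
    · rw [if_pos h, if_pos h, ih]; simp
    · rw [if_neg h, if_neg h, ih]

theorem pvGA_break (xs : List String) : ∀ r : List String,
    pvGA xs r =
      match (pvBreak xs).2 with
      | [] => []
      | m :: tail => (r ++ (pvBreak xs).1) :: pvGA tail [m] := by
  induction xs with
  | nil => intro r; simp [pvGA, pvBreak]
  | cons x xs ih =>
    intro r
    by_cases h : PySem.Str.startswith x ">Gene"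
    · simp only [pvGA, pvBreak, if_pos h]
      simp
    · simp only [pvGA, pvBreak, if_neg h, ih (r ++ [x])]
      cases (pvBreak xs).2 with
      | nil => simp
      | cons m tail => simp

theorem pvLoop_eq : ∀ (n : Nat) (rest : List String), rest.length ≤ n →
    ∀ (head : Option String) (pre : List String),
    pvLoop head pre rest =
      match rest with
      | [] => []
      | m :: tail => (match head with | none => pre | some h => h :: pre) :: pvGA tail [m] := by
  intro n
  induction n with
  | zero =>
    intro rest hlen head pre
    have : rest = [] := List.eq_nil_of_length_eq_zero (Nat.le_zero.mp hlen)
    subst this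
    simp [pvLoop]
  | succ n ih =>
    intro rest hlen head pre
    cases rest with
    | nil => simp [pvLoop]
    | cons m tail =>
      have htail : (pvBreak tail).2.length ≤ n := by
        have := pvBreak_snd_len tail
        simp at hlen
        omega
      have hstep : pvLoop head pre (m :: tail) =
          (match head with | none => pre | some h => h :: pre)
            :: pvLoop (some m) (pvBreak tail).1 (pvBreak tail).2 := by
        rw [pvLoop.eq_def]
      rw [hstep, ih _ htail]
      clear hstep hlen htail ih
      show ((match head with | none => pre | some h => h :: pre) ::
            match (pvBreak tail).2 with
            | [] => []
            | m2 :: t2 => (m :: (pvBreak tail).1) :: pvGA t2 [m2])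
          = (match head with | none => pre | some h => h :: pre) :: pvGA tail [m]
      refine congrArg _ ?_
      rw [pvGA_break tail [m]]
      cases (pvBreak tail).2 with
      | nil => rfl
      | cons m2 t2 => rfl

-- ===== VERDICT (by name: the statement is the Claim_ definition above) =====
theorem split_into_sequences_spec : Claim_equal_split_into_sequences := by
  intro lines _
  unfold Spec_split_into_sequences split_into_sequences split_into_sequences_alt
  have hA : (lines.foldl
      (fun (st : List String × List (List String)) line =>
        if PySem.Str.startswith line ">Gene" then ([line], st.2 ++ [st.1])
        else (st.1 ++ [line], st.2))
      ([], [])).2 = [] ++ pvGA lines [] := pvFoldA_eq lines [] []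
  rw [hA, List.nil_append, pvGA_break lines []]
  rw [pvLoop_eq (pvBreak lines).2.length _ (Nat.le_refl _)]
  cases (pvBreak lines).2 with
  | nil => rfl
  | cons m tail => simp
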